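-- pv_equiv track=rewrite | github.com/uguraka/primerVizCLI | src/primerviz/visualize.py | _build_ruler
-- ===== SOURCE A (Python) =====
-- def _build_ruler(length: int, base: int = 1) -> str:
--     """Two-line ruler with ticks at multiples of 10 in genomic coordinates."""
--     padding = "    "
--     nums:  list[str] = [" "] * length
--     ticks: list[str] = [" "] * length
--
--     for i in range(length):
--         pos = base + i
--         if pos % 10 == 0:
--             ticks[i] = "|"
--             label = str(pos)
--             label_start = i - (len(label) - 1)
--             for j, ch in enumerate(label):
--                 idx = label_start + j
--                 if 0 <= idx < length:
--                     nums[idx] = ch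
--
--     return padding + "".join(nums) + "\n" + padding + "".join(ticks)
-- ===== SOURCE B (Python) =====
-- def _build_ruler(length: int, base: int = 1) -> str:
--     """Two-line ruler with ticks at multiples of 10 in genomic coordinates."""
--     padding = "    "
--     nums = [" "] * length
--     ticks = [" "] * length
--
--     first = base + ((10 - base % 10) % 10)          # first multiple of 10 in the window
--     for pos in range(first, base + length, 10):     # jump tick to tick instead of scanning
--         i = pos - base
--         ticks[i] = "|"
--         label = str(pos)
--         label_start = i - (len(label) - 1)
--         s = max(label_start, 0)                     # clip the label at the left edge
--         nums[s:i + 1] = label[s - label_start:]     # splice the (clipped) label in one go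
--
--     return padding + "".join(nums) + "\n" + padding + "".join(ticks)
-- ===== Notes on version B (the rewrite author's own statement) =====
-- stated objective: faster
-- what changed: A scans every index in range(length) and tests pos % 10 == 0 at each, writing the label character by character; B computes the first multiple of 10 analytically and jumps tick to tick with range(first, base+length, 10), splicing each (left-clipped) label in with one slice assignment.
import Mathlib
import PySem

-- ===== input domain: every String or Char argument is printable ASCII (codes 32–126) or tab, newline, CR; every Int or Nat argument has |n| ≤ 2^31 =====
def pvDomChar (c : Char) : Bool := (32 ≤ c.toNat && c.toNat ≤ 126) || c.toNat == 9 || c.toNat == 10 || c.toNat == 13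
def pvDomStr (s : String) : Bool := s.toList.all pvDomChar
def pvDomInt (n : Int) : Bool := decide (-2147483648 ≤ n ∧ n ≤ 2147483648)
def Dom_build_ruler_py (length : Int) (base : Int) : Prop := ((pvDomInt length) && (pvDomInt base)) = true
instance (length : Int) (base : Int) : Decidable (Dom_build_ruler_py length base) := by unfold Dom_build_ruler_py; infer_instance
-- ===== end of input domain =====

-- B replaces A's scan of every index (testing pos % 10 == 0 at each) by a direct jump from
-- tick to tick (range(first, base+length, 10)) with a one-splice label write; return values
-- are proved identical.

-- ===== PORT A =====
-- loop body of A's `for i in range(length)` (the tick branch is `aTick`)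
def aTick (length : Int) (base : Int) (st : List Char × List Char) (i : Int) :
    List Char × List Char :=
  let pos := base + i
  let ticks' := PySem.List.pySetD st.2 i '|'
  let label := PySem.Int.toChars pos
  let label_start := i - ((label.length : Int) - 1)
  let nums' := (PySem.List.enumerate label).foldl
      (fun ns jch =>
        if 0 ≤ label_start + jch.1 ∧ label_start + jch.1 < length then
          PySem.List.pySetD ns (label_start + jch.1) jch.2
        else ns) st.1
  (nums', ticks')

def aStep (length : Int) (base : Int) (st : List Char × List Char) (i : Int) :
    List Char × List Char :=
  if PySem.Int.mod (base + i) 10 = 0 then aTick length base st i else st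

def build_ruler_py (length : Int) (base : Int) : String :=
  let st := (PySem.List.pyRange 0 length 1).foldl (aStep length base)
      (List.replicate length.toNat ' ', List.replicate length.toNat ' ')
  "    " ++ String.ofList st.1 ++ "\n" ++ "    " ++ String.ofList st.2

-- ===== PORT B =====
-- loop body of B's `for pos in range(first, base+length, 10)`
def bStep (length : Int) (base : Int) (st : List Char × List Char) (pos : Int) :
    List Char × List Char :=
  let i := pos - base
  let ticks' := PySem.List.pySetD st.2 i '|'
  let label := PySem.Int.toChars pos
  let label_start := i - ((label.length : Int) - 1)
  let s := max label_start 0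
  -- nums[s:i+1] = label[s-label_start:]  (slice assignment, ported as take/label-slice/drop)
  let nums' := PySem.List.slice st.1 none (some s)
      ++ PySem.List.slice label (some (s - label_start)) none
      ++ PySem.List.slice st.1 (some (i + 1)) none
  (nums', ticks')

def build_ruler_py_alt (length : Int) (base : Int) : String :=
  let first := base + PySem.Int.mod (10 - PySem.Int.mod base 10) 10
  let st := (PySem.List.pyRange first (base + length) 10).foldl (bStep length base)
      (List.replicate length.toNat ' ', List.replicate length.toNat ' ')
  "    " ++ String.ofList st.1 ++ "\n" ++ "    " ++ String.ofList st.2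

-- ===== PRECONDITION & SPEC =====
def Spec_build_ruler_py (length : Int) (base : Int) (out : String) : Prop := out = build_ruler_py_alt length base
instance (length : Int) (base : Int) (out : String) : Decidable (Spec_build_ruler_py length base out) := by unfold Spec_build_ruler_py; infer_instance

-- ===== CLAIM (what is proved, stated in full; the proofs are below) =====
def Claim_equal_build_ruler_py : Prop := ∀ (length : Int) (base : Int), Dom_build_ruler_py length base → Spec_build_ruler_py length base (build_ruler_py length base)

-- ===== LEMMAS AND PROOFS =====

-- step-10 range: nil and cons unfoldings
lemma pyRange10_nil (a b : Int) (h : b ≤ a) : PySem.List.pyRange a b 10 = [] := by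
  rw [PySem.List.pyRange_of_pos a b (by norm_num)]
  simp [not_lt.mpr h]

lemma pyRange10_cons (a b : Int) (h : a < b) :
    PySem.List.pyRange a b 10 = a :: PySem.List.pyRange (a + 10) b 10 := by
  rw [PySem.List.pyRange_of_pos a b (by norm_num),
      PySem.List.pyRange_of_pos (a + 10) b (by norm_num)]
  have hcnt : (if a < b then ((b - a + 10 - 1) / 10).toNat else 0)
      = (if a + 10 < b then ((b - (a + 10) + 10 - 1) / 10).toNat else 0) + 1 := by
    split_ifs <;> omega
  rw [hcnt, List.range_succ_eq_map]
  simp only [List.map_cons, List.map_map, Nat.cast_zero, mul_zero, add_zero]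
  exact congrArg (List.cons a)
    (List.map_congr_left (fun k _ => by simp only [Function.comp_apply]; push_cast; ring))

-- A's loop with the `if` = the tick branch folded over the filtered index list
lemma foldl_aStep_filter (length base : Int) : ∀ (l : List Int) (st : List Char × List Char),
    l.foldl (aStep length base) st
      = (l.filter (fun i => decide (PySem.Int.mod (base + i) 10 = 0))).foldl (aTick length base) st := by
  intro l
  induction l with
  | nil => intro st; rfl
  | cons x xs ih =>
    intro st
    rw [List.foldl_cons, List.filter_cons]
    by_cases h : PySem.Int.mod (base + x) 10 = 0
    · rw [if_pos (decide_eq_true h),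
        show aStep length base st x = aTick length base st x from by unfold aStep; rw [if_pos h],
        List.foldl_cons, ih]
    · rw [if_neg (by simpa using h),
        show aStep length base st x = st from by unfold aStep; rw [if_neg h], ih]

-- indices of the ticks: filtering [a, length) by (base+i) % 10 == 0 is the step-10 range, shifted
lemma tick_range (base length : Int) : ∀ (n : Nat) (a : Int), (length - a).toNat = n →
    (PySem.List.pyRange a length 1).filter (fun i => decide (PySem.Int.mod (base + i) 10 = 0))
      = (PySem.List.pyRange ((base + a) + PySem.Int.mod (10 - PySem.Int.mod (base + a) 10) 10)
          (base + length) 10).map (fun pos => pos - base) := by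
  intro n
  induction n with
  | zero =>
    intro a ha
    have h1 : length ≤ a := by omega
    have hm := PySem.Int.mod_nonneg (10 - PySem.Int.mod (base + a) 10) (b := 10) (by norm_num)
    rw [PySem.List.pyRange_one_eq_nil h1, pyRange10_nil _ _ (by omega)]
    rfl
  | succ n ih =>
    intro a ha
    have h1 : a < length := by omega
    rw [PySem.List.pyRange_one_cons h1]
    have hm : ∀ x : Int, PySem.Int.mod x 10 = x % 10 :=
      fun x => PySem.Int.mod_eq_emod_of_pos (by norm_num)
    by_cases h : PySem.Int.mod (base + a) 10 = 0
    · have e0 : (base + a) + PySem.Int.mod (10 - PySem.Int.mod (base + a) 10) 10 = base + a := by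
        simp only [hm] at h ⊢; omega
      have e1 : (base + (a + 1)) + PySem.Int.mod (10 - PySem.Int.mod (base + (a + 1)) 10) 10
          = base + a + 10 := by
        simp only [hm] at h ⊢; omega
      rw [e0, pyRange10_cons _ _ (by omega), List.filter_cons, if_pos (decide_eq_true h)]
      simp only [List.map_cons, add_sub_cancel_left]
      rw [ih (a + 1) (by omega), e1]
    · have e1 : (base + (a + 1)) + PySem.Int.mod (10 - PySem.Int.mod (base + (a + 1)) 10) 10
          = (base + a) + PySem.Int.mod (10 - PySem.Int.mod (base + a) 10) 10 := by
        simp only [hm] at h ⊢; omega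
      rw [List.filter_cons, if_neg (by simpa using h), ih (a + 1) (by omega), e1]

-- the character-by-character clipped label write is a take/slice/drop splice
lemma writeLoop (L off : Int) : ∀ (lab : List Char) (s : Int) (ns : List Char),
    (ns.length : Int) = L → off + s + (lab.length : Int) ≤ L →
    (PySem.List.enumerate lab s).foldl
        (fun a p =>
          if 0 ≤ off + p.1 ∧ off + p.1 < L then PySem.List.pySetD a (off + p.1) p.2 else a) ns
      = ns.take (max (off + s) 0).toNat ++ lab.drop ((max (off + s) 0) - (off + s)).toNat
          ++ ns.drop (off + s + (lab.length : Int)).toNat := by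
  intro lab
  induction lab with
  | nil =>
    intro s ns hlen _
    simp only [PySem.List.enumerate_nil, List.foldl_nil, List.length_nil, Int.natCast_zero,
      add_zero, List.drop_nil]
    rcases le_or_gt 0 (off + s) with h | h
    · rw [max_eq_left h]
      simp [List.take_append_drop]
    · rw [max_eq_right h.le]
      simp [Int.toNat_of_nonpos h.le]
  | cons c cs ih =>
    intro s ns hlen hle
    rw [PySem.List.enumerate_cons, List.foldl_cons]
    rcases le_or_gt 0 (off + s) with h0 | h0
    · have hlt : off + s < L := by
        simp only [List.length_cons] at hle; push_cast at hle; omega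
      rw [if_pos ⟨h0, hlt⟩, PySem.List.pySetD_of_nonneg ns c h0]
      have hlen' : ((ns.set (off + s).toNat c).length : Int) = L := by
        rw [List.length_set]; exact hlen
      have hle' : off + (s + 1) + (cs.length : Int) ≤ L := by
        simp only [List.length_cons] at hle; push_cast at hle ⊢; omega
      rw [ih (s + 1) _ hlen' hle']
      have htn : (off + s).toNat < ns.length := by omega
      have e1 : max (off + (s + 1)) 0 = off + s + 1 := by omega
      have e2 : (off + s + 1).toNat = (off + s).toNat + 1 := by omega
      have e3 : max (off + s) 0 = off + s := by omega
      have d1 : off + s + 1 - (off + (s + 1)) = 0 := by ring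
      have d2 : off + (s + 1) + (cs.length : Int) = off + s + ((c :: cs).length : Int) := by
        simp only [List.length_cons]; push_cast; ring
      have dgt : (off + s).toNat < (off + s + ((c :: cs).length : Int)).toNat := by
        simp only [List.length_cons]; push_cast; omega
      have hset_take : (ns.set (off + s).toNat c).take ((off + s).toNat + 1)
          = ns.take (off + s).toNat ++ [c] := by
        rw [List.set_eq_take_cons_drop c htn, List.take_append]
        simp [List.length_take, Nat.min_eq_left htn.le]
      have hset_drop : (ns.set (off + s).toNat c).drop (off + s + ((c :: cs).length : Int)).toNat
          = ns.drop (off + s + ((c :: cs).length : Int)).toNat := List.drop_set_of_lt dgt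
      rw [e1, d1, d2, e2, hset_take, hset_drop, e3, sub_self]
      simp only [Int.toNat_zero, List.drop_zero, List.append_assoc,
        List.cons_append, List.nil_append]
    · have hcond : ¬ (0 ≤ off + s ∧ off + s < L) := by omega
      rw [if_neg hcond]
      have hle' : off + (s + 1) + (cs.length : Int) ≤ L := by
        simp only [List.length_cons] at hle; push_cast at hle ⊢; omega
      have eM : max (off + (s + 1)) 0 = 0 := by omega
      have e1 : max (off + s) 0 = 0 := by omega
      have e4 : (0 - (off + s)).toNat = (0 - (off + (s + 1))).toNat + 1 := by omega
      have d2 : off + (s + 1) + (cs.length : Int) = off + s + ((c :: cs).length : Int) := by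
        simp only [List.length_cons]; push_cast; ring
      rw [ih (s + 1) _ hlen hle', eM, e1, e4, d2]
      simp only [Int.toNat_zero, List.take_zero, List.nil_append, List.drop_succ_cons]

-- on a tick position, A's branch body equals B's loop body
lemma step_eq (length base pos : Int) (st : List Char × List Char)
    (h1 : base ≤ pos) (h2 : pos < base + length)
    (hn : (st.1.length : Int) = length) :
    aTick length base st (pos - base) = bStep length base st pos := by
  have hpos : base + (pos - base) = pos := by ring
  unfold aTick bStep
  simp only [hpos]
  congr 1
  set lab := PySem.Int.toChars pos with hlab
  set ls := pos - base - ((lab.length : Int) - 1) with hls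
  have hW := writeLoop length ls lab 0 st.1 hn (by omega)
  simp only [add_zero] at hW
  rw [hW,
    PySem.List.slice_to st.1 (le_max_right ls 0),
    PySem.List.slice_from lab (by omega : (0:Int) ≤ max ls 0 - ls),
    PySem.List.slice_from st.1 (by omega : (0:Int) ≤ pos - base + 1)]
  have e1 : ls + (lab.length : Int) = pos - base + 1 := by omega
  rw [e1]

-- B's loop body preserves the line lengths
lemma bStep_len (length base pos : Int) (st : List Char × List Char)
    (h1 : base ≤ pos) (h2 : pos < base + length)
    (hn : (st.1.length : Int) = length) (ht : (st.2.length : Int) = length) :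
    (((bStep length base st pos).1.length : Int) = length ∧
     ((bStep length base st pos).2.length : Int) = length) := by
  unfold bStep
  simp only
  constructor
  · rw [PySem.List.slice_to st.1 (le_max_right _ 0),
      PySem.List.slice_from (PySem.Int.toChars pos)
        (by omega : (0:Int) ≤ max (pos - base - ((PySem.Int.toChars pos).length - 1)) 0
            - (pos - base - ((PySem.Int.toChars pos).length - 1))),
      PySem.List.slice_from st.1 (by omega : (0:Int) ≤ pos - base + 1)]
    simp only [List.length_append, List.length_take, List.length_drop]
    omega
  · rw [PySem.List.length_pySetD]; exact ht

-- fold congruence under an invariant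
lemma foldl_congr_inv {α σ : Type} (P : σ → Prop) (f g : σ → α → σ) :
    ∀ (l : List α) (s : σ), P s →
      (∀ t x, x ∈ l → P t → f t x = g t x) →
      (∀ t x, x ∈ l → P t → P (g t x)) →
      l.foldl f s = l.foldl g s := by
  intro l
  induction l with
  | nil => intros; rfl
  | cons x xs ih =>
    intro s hs hfg hP
    simp only [List.foldl_cons]
    rw [hfg s x (List.mem_cons_self) hs]
    exact ih _ (hP s x (List.mem_cons_self) hs)
      (fun t y hy => hfg t y (List.mem_cons_of_mem _ hy))
      (fun t y hy => hP t y (List.mem_cons_of_mem _ hy))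

-- the two folds agree
lemma fold_eq (length base : Int) :
    (PySem.List.pyRange 0 length 1).foldl (aStep length base)
        (List.replicate length.toNat ' ', List.replicate length.toNat ' ')
      = (PySem.List.pyRange (base + PySem.Int.mod (10 - PySem.Int.mod base 10) 10)
            (base + length) 10).foldl (bStep length base)
          (List.replicate length.toNat ' ', List.replicate length.toNat ' ') := by
  have hm : ∀ x : Int, PySem.Int.mod x 10 = x % 10 :=
    fun x => PySem.Int.mod_eq_emod_of_pos (by norm_num)
  rcases le_or_gt length 0 with hL | hL
  · have hmn := PySem.Int.mod_nonneg (10 - PySem.Int.mod base 10) (b := 10) (by norm_num)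
    rw [PySem.List.pyRange_one_eq_nil hL, pyRange10_nil _ _ (by omega)]
    rfl
  · rw [foldl_aStep_filter, tick_range base length (length - 0).toNat 0 rfl]
    have e0 : (base + 0) + PySem.Int.mod (10 - PySem.Int.mod (base + 0) 10) 10
        = base + PySem.Int.mod (10 - PySem.Int.mod base 10) 10 := by rw [add_zero]
    rw [e0, List.foldl_map]
    have hfirst : (10:Int) ∣ base + PySem.Int.mod (10 - PySem.Int.mod base 10) 10 := by
      simp only [hm]; omega
    have hbase : base ≤ base + PySem.Int.mod (10 - PySem.Int.mod base 10) 10 := by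
      have := PySem.Int.mod_nonneg (10 - PySem.Int.mod base 10) (b := 10) (by norm_num)
      omega
    apply foldl_congr_inv (fun st => (st.1.length : Int) = length ∧ (st.2.length : Int) = length)
    · constructor <;> simp [List.length_replicate] <;> omega
    · intro t x hx hP
      rw [PySem.List.mem_pyRange_iff_of_pos (by norm_num)] at hx
      exact step_eq length base x t (le_trans hbase hx.1) hx.2.1 hP.1
    · intro t x hx hP
      rw [PySem.List.mem_pyRange_iff_of_pos (by norm_num)] at hx
      exact bStep_len length base x t (le_trans hbase hx.1) hx.2.1 hP.1 hP.2

-- ===== VERDICT (by name: the statement is the Claim_ definition above) =====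
theorem build_ruler_py_spec : Claim_equal_build_ruler_py := by
  intro length base _
  show build_ruler_py length base = build_ruler_py_alt length base
  unfold build_ruler_py build_ruler_py_alt
  rw [fold_eq]
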